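-- pv_equiv track=rewrite | github.com/banana-galaxy/challenges | challenge18(apple_boxes)/solutions/SnarfyKat.py | solution
-- ===== SOURCE A (Python) =====
-- def solution(k):
--
--     numYellow = numRed = 0
--
--     for i in range(1, k+1):
--         applesInBox = i*i
--         if (i % 2) == 0:
--             numRed += applesInBox
--         else:
--             numYellow += applesInBox
--
--     return numRed - numYellow
-- ===== SOURCE B (Python) =====
-- def solution(k):
--     # Closed form: sum_{i=1}^{k} (-1)^i * i^2 = (-1)^k * k*(k+1)/2
--     if k <= 0:
--         return 0
--     s = k * (k + 1) // 2
--     return s if k % 2 == 0 else -s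
-- ===== Notes on version B (the rewrite author's own statement) =====
-- stated objective: faster
-- what changed: Replaced the O(k) loop accumulating even/odd squares with the closed form (-1)^k * k*(k+1)/2.
import Mathlib
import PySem

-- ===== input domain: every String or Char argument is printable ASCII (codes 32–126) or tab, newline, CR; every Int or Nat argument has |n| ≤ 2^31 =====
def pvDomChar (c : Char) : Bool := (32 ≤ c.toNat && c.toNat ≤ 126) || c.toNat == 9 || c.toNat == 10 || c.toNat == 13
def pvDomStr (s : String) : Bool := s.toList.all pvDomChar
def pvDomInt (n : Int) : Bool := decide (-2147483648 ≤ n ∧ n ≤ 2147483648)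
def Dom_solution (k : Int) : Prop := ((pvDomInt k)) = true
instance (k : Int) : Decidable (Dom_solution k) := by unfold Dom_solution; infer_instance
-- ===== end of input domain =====

-- B replaces A's O(k) even/odd-square accumulation loop with the closed form (-1)^k * k*(k+1)/2 (O(1)).

-- ===== PORT A =====
def solution (k : Int) : Int :=
  let st := (PySem.List.pyRange 1 (k + 1) 1).foldl
    (fun (p : Int × Int) i =>
      let applesInBox := i * i
      if PySem.Int.mod i 2 == 0 then (p.1, p.2 + applesInBox)
      else (p.1 + applesInBox, p.2)) (0, 0)
  -- st = (numYellow, numRed)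
  st.2 - st.1

-- ===== PORT B =====
def solution_alt (k : Int) : Int :=
  if k ≤ 0 then 0
  else
    let s := PySem.Int.floordiv (k * (k + 1)) 2
    if PySem.Int.mod k 2 == 0 then s else -s

-- ===== PRECONDITION & SPEC =====
def Spec_solution (k : Int) (out : Int) : Prop := out = solution_alt k
instance (k : Int) (out : Int) : Decidable (Spec_solution k out) := by unfold Spec_solution; infer_instance

-- ===== CLAIM (what is proved, stated in full; the proofs are below) =====
def Claim_equal_solution : Prop := ∀ (k : Int), Dom_solution k → Spec_solution k (solution k)

-- ===== LEMMAS AND PROOFS =====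

-- the loop body of A
def pvStep (p : Int × Int) (i : Int) : Int × Int :=
  let applesInBox := i * i
  if PySem.Int.mod i 2 == 0 then (p.1, p.2 + applesInBox)
  else (p.1 + applesInBox, p.2)

-- signed sum T n = Σ_{i=1}^{n} (-1)^i i²
def pvT : Nat → Int
  | 0 => 0
  | n + 1 => pvT n + (if (n + 1) % 2 = 0 then ((n : Int) + 1) ^ 2 else -((n : Int) + 1) ^ 2)

lemma pvStep_diff (p : Int × Int) (i : Int) :
    (pvStep p i).2 - (pvStep p i).1 =
      p.2 - p.1 + (if PySem.Int.mod i 2 == 0 then i * i else -(i * i)) := by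
  unfold pvStep
  split_ifs <;> simp <;> ring

lemma pv_mod_two_cast (n : Nat) : PySem.Int.mod (n : Int) 2 = ((n % 2 : Nat) : Int) := by
  exact_mod_cast PySem.Int.mod_natCast n 2

lemma pvLoop (n : Nat) (p : Int × Int) :
    (((PySem.List.pyRange 1 ((n : Int) + 1) 1).foldl pvStep p).2
      - ((PySem.List.pyRange 1 ((n : Int) + 1) 1).foldl pvStep p).1)
      = p.2 - p.1 + pvT n := by
  induction n generalizing p with
  | zero =>
    rw [show ((0 : Nat) : Int) + 1 = 1 by norm_num,
      PySem.List.pyRange_one_eq_nil le_rfl]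
    simp [pvT]
  | succ m ih =>
    have h : PySem.List.pyRange 1 (((m + 1 : Nat) : Int) + 1) 1
        = PySem.List.pyRange 1 ((m : Int) + 1) 1 ++ [((m : Int) + 1)] := by
      have h1 : ((m + 1 : Nat) : Int) + 1 = ((m : Int) + 1) + 1 := by push_cast; ring
      rw [h1]
      apply PySem.List.pyRange_one_succ_right
      omega
    rw [h, List.foldl_append]
    simp only [List.foldl]
    rw [pvStep_diff, ih]
    have hmod : PySem.Int.mod ((m : Int) + 1) 2 = (((m + 1) % 2 : Nat) : Int) := by
      have := pv_mod_two_cast (m + 1); push_cast at this ⊢; omega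
    rw [hmod]
    rcases Nat.even_or_odd (m + 1) with he | ho
    · have h2 : (m + 1) % 2 = 0 := Nat.even_iff.mp he
      simp [pvT, h2]; ring
    · have h2 : (m + 1) % 2 = 1 := Nat.odd_iff.mp ho
      simp [pvT, h2]; ring

lemma pvT_double (n : Nat) :
    2 * pvT n = if n % 2 = 0 then (n : Int) * ((n : Int) + 1) else -((n : Int) * ((n : Int) + 1)) := by
  induction n with
  | zero => simp [pvT]
  | succ m ih =>
    rcases Nat.even_or_odd (m + 1) with he | ho
    · have h2 : (m + 1) % 2 = 0 := Nat.even_iff.mp he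
      have hm : m % 2 = 1 := by omega
      simp only [pvT, h2, hm] at ih ⊢
      norm_num at ih ⊢
      linear_combination ih
    · have h2 : (m + 1) % 2 = 1 := Nat.odd_iff.mp ho
      have hm : m % 2 = 0 := by omega
      simp only [pvT, h2, hm] at ih ⊢
      norm_num at ih ⊢
      linear_combination ih

lemma pvAlt (n : Nat) (hn : 0 < n) : solution_alt (n : Int) = pvT n := by
  unfold solution_alt
  have hn' : ¬ ((n : Int) ≤ 0) := by exact_mod_cast Nat.not_le.mpr hn
  rw [if_neg hn', PySem.Int.floordiv_eq_ediv_of_pos (by omega),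
    PySem.Int.mod_eq_emod_of_pos (by omega)]
  have hd := pvT_double n
  rcases Nat.even_or_odd n with he | ho
  · have h2 : n % 2 = 0 := Nat.even_iff.mp he
    have h2i : (n : Int) % 2 = 0 := by omega
    rw [if_pos h2] at hd
    simp only [h2i]
    norm_num
    rw [← hd]
    omega
  · have h2 : n % 2 = 1 := Nat.odd_iff.mp ho
    have h2i : (n : Int) % 2 = 1 := by omega
    rw [if_neg (by omega : ¬ n % 2 = 0)] at hd
    have hrw : (n : Int) * ((n : Int) + 1) = 2 * (-pvT n) := by linarith
    simp only [h2i]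
    norm_num
    rw [hrw]
    omega

-- ===== VERDICT (by name: the statement is the Claim_ definition above) =====
theorem solution_spec : Claim_equal_solution := by
  intro k _
  unfold Spec_solution
  by_cases hk : k ≤ 0
  · have : PySem.List.pyRange 1 (k + 1) 1 = [] :=
      PySem.List.pyRange_one_eq_nil (by omega)
    simp [solution, this, solution_alt, hk]
  · obtain ⟨n, rfl⟩ : ∃ n : Nat, k = (n : Int) :=
      ⟨k.toNat, (Int.toNat_of_nonneg (by omega)).symm⟩
    have hl := pvLoop n (0, 0)
    unfold solution
    show ((PySem.List.pyRange 1 ((n:Int)+1) 1).foldl pvStep (0,0)).2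
        - ((PySem.List.pyRange 1 ((n:Int)+1) 1).foldl pvStep (0,0)).1 = solution_alt (n : Int)
    rcases Nat.eq_zero_or_pos n with rfl | hn
    · rw [hl]; simp [pvT, solution_alt]
    · rw [hl, pvAlt n hn]; simp
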